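-- pv_equiv track=rewrite | github.com/katrina-uw/CNT | data_utils/dataset.py | get_events
-- ===== SOURCE A (Python) =====
-- def get_events(y_test, outlier=1, normal=0, breaks=[]):
--     events = dict()
--     label_prev = normal
--     event = 0  # corresponds to no event
--     event_start = 0
--     for tim, label in enumerate(y_test):
--         if label == outlier:
--             if label_prev == normal:
--                 event += 1
--                 event_start = tim
--             elif tim in breaks:
--                 # A break point was hit, end current event and start new one
--                 event_end = tim - 1
--                 events[event] = (event_start, event_end)
--                 event += 1
--                 event_start = tim
--
--         else:
--             # event_by_time_true[tim] = 0
--             if label_prev == outlier: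
--                 event_end = tim - 1
--                 events[event] = (event_start, event_end)
--         label_prev = label
--
--     if label_prev == outlier:
--         event_end = tim - 1
--         events[event] = (event_start, event_end)
--     return events
-- ===== SOURCE B (Python) =====
-- def get_events(y_test, outlier=1, normal=0, breaks=[]):
--     # Phase 1: turn the label sequence into a flat stream of open/close actions,
--     # computed from (prev, cur) pairs; then Phase 2: interpret that stream.
--     bset = set(breaks)
--     actions = []  # (True, i) = open new event at i; (False, j) = close current event at j
--     for i, (prev, cur) in enumerate(zip([normal] + list(y_test[:-1]), y_test)):
--         if cur == outlier:
--             if prev == normal: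
--                 actions.append((True, i))
--             elif i in bset:
--                 actions.append((False, i - 1))
--                 actions.append((True, i))
--         elif prev == outlier:
--             actions.append((False, i - 1))
--     if y_test and y_test[-1] == outlier:
--         actions.append((False, len(y_test) - 1))
--     events = {}
--     ev, start = 0, 0
--     for is_open, pos in actions:
--         if is_open:
--             ev += 1
--             start = pos
--         else:
--             events[ev] = (start, pos)
--     return events
-- ===== Notes on version B (the rewrite author's own statement) =====
-- stated objective: alternative
-- what changed: Replaces A's single monolithic stateful scan (label_prev/event/event_start mutated in one loop with a trailing fix-up) by a two-phase pipeline: first derive a flat stream of open/close actions from consecutive (prev,cur) label pairs, then interpret that stream with a tiny counter/start machine into the events dict.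
-- intended difference: On inputs whose last label equals outlier, A ends the final event at len(y_test)-2 (an off-by-one from reusing the leftover loop index: the run really extends to the last position, which the in-loop closing rule would give), while B ends it at len(y_test)-1, the intended inclusive end of the run. — e.g. on get_events([1], 1, 0, []): A returns [(1, 0, -1)], B returns [(1, 0, 0)]
import Mathlib
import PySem

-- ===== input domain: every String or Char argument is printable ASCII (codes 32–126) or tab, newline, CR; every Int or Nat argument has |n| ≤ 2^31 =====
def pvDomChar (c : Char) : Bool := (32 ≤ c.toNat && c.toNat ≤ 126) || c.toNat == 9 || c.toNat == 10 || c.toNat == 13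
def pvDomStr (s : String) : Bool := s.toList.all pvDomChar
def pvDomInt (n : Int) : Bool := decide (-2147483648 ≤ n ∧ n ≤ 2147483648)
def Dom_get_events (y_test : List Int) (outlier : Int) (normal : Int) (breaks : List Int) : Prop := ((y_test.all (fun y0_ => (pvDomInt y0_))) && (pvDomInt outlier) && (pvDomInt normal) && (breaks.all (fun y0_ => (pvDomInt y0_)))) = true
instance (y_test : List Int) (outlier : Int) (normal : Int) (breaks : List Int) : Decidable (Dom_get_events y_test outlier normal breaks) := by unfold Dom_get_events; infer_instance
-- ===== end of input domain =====

-- B rewrites A's monolithic stateful scan as a two-phase pipeline (action stream + small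
-- interpreter) and fixes A's off-by-one final close when the sequence ends in an outlier run.

-- ===== PORT A =====
-- A's for-loop over enumerate(y_test) as the obvious structural recursion over the same
-- state (events dict, label_prev, event, event_start), with tim the running index.
def aLoop (outlier : Int) (normal : Int) (breaks : List Int) :
    List Int → Int → PySem.Dict Int (Int × Int) → Int → Int → Int →
    (PySem.Dict Int (Int × Int) × Int × Int × Int)
  | [], _, d, prev, ev, s => (d, prev, ev, s)
  | label :: rest, tim, d, prev, ev, s =>
    if label = outlier then
      if prev = normal then aLoop outlier normal breaks rest (tim + 1) d label (ev + 1) tim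
      else if breaks.contains tim then
        aLoop outlier normal breaks rest (tim + 1) (d.insert ev (s, tim - 1)) label (ev + 1) tim
      else aLoop outlier normal breaks rest (tim + 1) d label ev s
    else
      if prev = outlier then
        aLoop outlier normal breaks rest (tim + 1) (d.insert ev (s, tim - 1)) label ev s
      else aLoop outlier normal breaks rest (tim + 1) d label ev s

def get_events (y_test : List Int) (outlier : Int) (normal : Int) (breaks : List Int) : List (Int × Int × Int) :=
  let r := aLoop outlier normal breaks y_test 0 PySem.Dict.empty normal 0 0
  -- after the loop, tim is the last index (len - 1); A raises if the loop never ran (Pre_)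
  (if r.2.1 = outlier then r.1.insert r.2.2.1 (r.2.2.2, ((y_test.length : Int) - 1) - 1) else r.1).items

-- ===== PORT B =====
-- Phase 1 of Source B: the action stream, a flatMap over enumerated (prev, cur) pairs.
def geActions (outlier : Int) (normal : Int) (bset : PySem.Set Int) (pairs : List (Int × Int × Int)) : List (Bool × Int) :=
  pairs.flatMap (fun pc =>
    if pc.2.2 = outlier then
      if pc.2.1 = normal then [(true, pc.1)]
      else if PySem.Set.contains bset pc.1 then [(false, pc.1 - 1), (true, pc.1)]
      else []
    else if pc.2.1 = outlier then [(false, pc.1 - 1)] else [])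

-- Phase 2 of Source B: interpret the stream with the (events, ev, start) machine.
def geRun : List (Bool × Int) → PySem.Dict Int (Int × Int) → Int → Int → PySem.Dict Int (Int × Int)
  | [], d, _, _ => d
  | (true, p) :: rest, d, ev, _ => geRun rest d (ev + 1) p
  | (false, p) :: rest, d, ev, s => geRun rest (d.insert ev (s, p)) ev s

def get_events_alt (y_test : List Int) (outlier : Int) (normal : Int) (breaks : List Int) : List (Int × Int × Int) :=
  let bset := PySem.Set.ofList breaks
  let pairs := PySem.List.enumerate ((normal :: y_test.dropLast).zip y_test) 0
  let acts := geActions outlier normal bset pairs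
    ++ (if y_test ≠ [] ∧ y_test.getLast? = some outlier then [(false, (y_test.length : Int) - 1)] else [])
  (geRun acts PySem.Dict.empty 0 0).items

-- ===== PRECONDITION & SPEC =====
-- Pre_ excludes exactly the inputs where A raises NameError: empty y_test with outlier == normal
-- (the final 'if label_prev == outlier' then reads the never-bound loop variable tim).
def Pre_get_events (y_test : List Int) (outlier : Int) (normal : Int) (breaks : List Int) : Prop :=
  ¬ (y_test = [] ∧ outlier = normal)
instance (y_test : List Int) (outlier : Int) (normal : Int) (breaks : List Int) : Decidable (Pre_get_events y_test outlier normal breaks) := by unfold Pre_get_events; infer_instance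

def pvWitness_get_events : List Int × Int × Int × List Int := ([1, 0, 1], 1, 0, [])

-- On inputs whose last label equals outlier, A ends the final event at len(y_test)-2 (off-by-one
-- from the leftover loop index), while B ends it at len(y_test)-1, the intended inclusive run end.
def D_get_events (y_test : List Int) (outlier : Int) (normal : Int) (breaks : List Int) : Prop :=
  0 < y_test.length ∧ y_test.getLastD normal = outlier
instance (y_test : List Int) (outlier : Int) (normal : Int) (breaks : List Int) : Decidable (D_get_events y_test outlier normal breaks) := by unfold D_get_events; infer_instance

def Spec_get_events (y_test : List Int) (outlier : Int) (normal : Int) (breaks : List Int) (out : List (Int × Int × Int)) : Prop := ¬ D_get_events y_test outlier normal breaks → out = get_events_alt y_test outlier normal breaks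
instance (y_test : List Int) (outlier : Int) (normal : Int) (breaks : List Int) (out : List (Int × Int × Int)) : Decidable (Spec_get_events y_test outlier normal breaks out) := by unfold Spec_get_events; infer_instance

def pvDiffWitness_get_events : List Int × Int × Int × List Int := ([1], 1, 0, [])
def pvDiffWitnessOut_get_events : (List (Int × Int × Int)) × (List (Int × Int × Int)) := ([(1, 0, -1)], [(1, 0, 0)])

-- ===== CLAIM (what is proved, stated in full; the proofs are below) =====
def Claim_unchanged_get_events : Prop := ∀ (y_test : List Int) (outlier : Int) (normal : Int) (breaks : List Int), Dom_get_events y_test outlier normal breaks → Pre_get_events y_test outlier normal breaks → Spec_get_events y_test outlier normal breaks (get_events y_test outlier normal breaks)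
def Claim_changed_get_events : Prop := Dom_get_events (pvDiffWitness_get_events.1) (pvDiffWitness_get_events.2.1) (pvDiffWitness_get_events.2.2.1) (pvDiffWitness_get_events.2.2.2) ∧ Pre_get_events (pvDiffWitness_get_events.1) (pvDiffWitness_get_events.2.1) (pvDiffWitness_get_events.2.2.1) (pvDiffWitness_get_events.2.2.2) ∧ D_get_events (pvDiffWitness_get_events.1) (pvDiffWitness_get_events.2.1) (pvDiffWitness_get_events.2.2.1) (pvDiffWitness_get_events.2.2.2) ∧ get_events (pvDiffWitness_get_events.1) (pvDiffWitness_get_events.2.1) (pvDiffWitness_get_events.2.2.1) (pvDiffWitness_get_events.2.2.2) = pvDiffWitnessOut_get_events.1 ∧ get_events_alt (pvDiffWitness_get_events.1) (pvDiffWitness_get_events.2.1) (pvDiffWitness_get_events.2.2.1) (pvDiffWitness_get_events.2.2.2) = pvDiffWitnessOut_get_events.2 ∧ pvDiffWitnessOut_get_events.1 ≠ pvDiffWitnessOut_get_events.2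
def Claim_exact_get_events : Prop := ∀ (y_test : List Int) (outlier : Int) (normal : Int) (breaks : List Int), Dom_get_events y_test outlier normal breaks → Pre_get_events y_test outlier normal breaks → D_get_events y_test outlier normal breaks → get_events y_test outlier normal breaks ≠ get_events_alt y_test outlier normal breaks

-- ===== LEMMAS AND PROOFS =====

-- the (prev, cur) pairs as a plain recursion, for induction
def pairs2 : Int → List Int → List (Int × Int)
  | _, [] => []
  | prev, a :: r => (prev, a) :: pairs2 a r

lemma pairs2_eq (y : List Int) : ∀ prev : Int, (prev :: y.dropLast).zip y = pairs2 prev y := by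
  induction y with
  | nil => intro prev; simp [pairs2]
  | cons a r ih =>
    intro prev
    cases r with
    | nil => simp [pairs2]
    | cons b t => simpa [pairs2, List.dropLast] using ih a

lemma getLastD_cons' (a d : Int) (r : List Int) : (a :: r).getLastD d = r.getLastD a := by
  cases r <;> rfl

-- geRun with the (ev, start) state made explicit
def geRunS : List (Bool × Int) → PySem.Dict Int (Int × Int) → Int → Int →
    (PySem.Dict Int (Int × Int) × Int × Int)
  | [], d, ev, s => (d, ev, s)
  | (true, p) :: rest, d, ev, _ => geRunS rest d (ev + 1) p
  | (false, p) :: rest, d, ev, s => geRunS rest (d.insert ev (s, p)) ev s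

lemma geRun_eq : ∀ (l : List (Bool × Int)) d ev s, geRun l d ev s = (geRunS l d ev s).1 := by
  intro l
  induction l with
  | nil => intro d ev s; rfl
  | cons p rest ih =>
    intro d ev s
    cases p with
    | mk b v => cases b <;> simp [geRun, geRunS, ih]

lemma geRunS_append : ∀ (l1 l2 : List (Bool × Int)) d ev s,
    geRunS (l1 ++ l2) d ev s =
      geRunS l2 (geRunS l1 d ev s).1 (geRunS l1 d ev s).2.1 (geRunS l1 d ev s).2.2 := by
  intro l1
  induction l1 with
  | nil => intro l2 d ev s; rfl
  | cons p rest ih =>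
    intro l2 d ev s
    cases p with
    | mk b v => cases b <;> simp [geRunS, ih]

lemma set_contains_ofList (xs : List Int) (x : Int) :
    PySem.Set.contains (PySem.Set.ofList xs) x = xs.contains x := by
  simp [PySem.Set.contains, PySem.Set.mem_ofList]

-- B's action stream from a given starting prev / index (proof-side abbreviation)
def actsOf (outlier normal : Int) (breaks : List Int) (prev : Int) (y : List Int) (tim : Int) : List (Bool × Int) :=
  geActions outlier normal (PySem.Set.ofList breaks) (PySem.List.enumerate (pairs2 prev y) tim)

lemma actsOf_cons (outlier normal : Int) (breaks : List Int) (prev a : Int) (r : List Int) (tim : Int) :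
    actsOf outlier normal breaks prev (a :: r) tim =
      geActions outlier normal (PySem.Set.ofList breaks) [(tim, prev, a)]
        ++ actsOf outlier normal breaks a r (tim + 1) := by
  simp [actsOf, pairs2, PySem.List.enumerate_cons, geActions]

-- the main correspondence: A's loop computes B's interpreter run over B's action stream
lemma loop_eq (outlier normal : Int) (breaks : List Int) :
    ∀ (y : List Int) (prev tim : Int) (d : PySem.Dict Int (Int × Int)) (ev s : Int),
    aLoop outlier normal breaks y tim d prev ev s =
      ((geRunS (actsOf outlier normal breaks prev y tim) d ev s).1, y.getLastD prev,
       (geRunS (actsOf outlier normal breaks prev y tim) d ev s).2.1,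
       (geRunS (actsOf outlier normal breaks prev y tim) d ev s).2.2) := by
  intro y
  induction y with
  | nil => intro prev tim d ev s; simp [aLoop, actsOf, pairs2, geActions, geRunS]
  | cons a r ih =>
    intro prev tim d ev s
    rw [actsOf_cons, geRunS_append, getLastD_cons']
    by_cases ha : a = outlier
    · by_cases hp : prev = normal
      · rw [show geActions outlier normal (PySem.Set.ofList breaks) [(tim, prev, a)]
            = [(true, tim)] from by simp [geActions, ha, hp]]
        simp only [aLoop, ha, hp, if_pos, geRunS]
        exact ih outlier (tim + 1) d (ev + 1) tim
      · by_cases hb : tim ∈ breaks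
        · have hbc : breaks.contains tim = true := by simpa using hb
          rw [show geActions outlier normal (PySem.Set.ofList breaks) [(tim, prev, a)]
              = [(false, tim - 1), (true, tim)] from by
              simp [geActions, ha, hp, set_contains_ofList, hb]]
          simp only [aLoop, ha, hp, hbc, if_pos, if_neg, ite_true, ite_false, geRunS]
          exact ih outlier (tim + 1) (d.insert ev (s, tim - 1)) (ev + 1) tim
        · have hbc : breaks.contains tim = false := by simpa using hb
          rw [show geActions outlier normal (PySem.Set.ofList breaks) [(tim, prev, a)]
              = [] from by simp [geActions, ha, hp, set_contains_ofList, hb]]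
          simp only [aLoop, ha, hp, hbc, ite_true, ite_false, geRunS]
          exact ih outlier (tim + 1) d ev s
    · by_cases hp : prev = outlier
      · rw [show geActions outlier normal (PySem.Set.ofList breaks) [(tim, prev, a)]
            = [(false, tim - 1)] from by simp [geActions, ha, hp]]
        simp only [aLoop, ha, hp, ite_true, ite_false, geRunS]
        exact ih a (tim + 1) (d.insert ev (s, tim - 1)) ev s
      · rw [show geActions outlier normal (PySem.Set.ofList breaks) [(tim, prev, a)]
            = [] from by simp [geActions, ha, hp]]
        simp only [aLoop, ha, hp, ite_true, ite_false, geRunS]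
        exact ih a (tim + 1) d ev s

lemma insert_ne_of_val_ne (d : PySem.Dict Int (Int × Int)) (k : Int) (v w : Int × Int)
    (h : v ≠ w) : (d.insert k v).items ≠ (d.insert k w).items := by
  intro he
  have heq : (d.insert k v) = (d.insert k w) := PySem.Dict.ext he
  have h1 : (d.insert k v).get? k = some v := PySem.Dict.get?_insert_self d k v
  have h2 : (d.insert k w).get? k = some w := PySem.Dict.get?_insert_self d k w
  rw [heq, h2] at h1
  exact h (Option.some.inj h1.symm)

-- the common final machine state both ports reach
def runOf (y_test : List Int) (outlier normal : Int) (breaks : List Int) :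
    PySem.Dict Int (Int × Int) × Int × Int :=
  geRunS (actsOf outlier normal breaks normal y_test 0) PySem.Dict.empty 0 0

lemma portA_shape (y_test : List Int) (outlier normal : Int) (breaks : List Int) :
    get_events y_test outlier normal breaks =
      (if y_test.getLastD normal = outlier then
        (runOf y_test outlier normal breaks).1.insert (runOf y_test outlier normal breaks).2.1
          ((runOf y_test outlier normal breaks).2.2, ((y_test.length : Int) - 1) - 1)
       else (runOf y_test outlier normal breaks).1).items := by
  show (let r := aLoop outlier normal breaks y_test 0 PySem.Dict.empty normal 0 0
        (if r.2.1 = outlier then r.1.insert r.2.2.1 (r.2.2.2, ((y_test.length : Int) - 1) - 1)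
         else r.1).items) = _
  rw [loop_eq]
  rfl

lemma portB_shape (y_test : List Int) (outlier normal : Int) (breaks : List Int) :
    get_events_alt y_test outlier normal breaks =
      (if y_test ≠ [] ∧ y_test.getLast? = some outlier then
        (runOf y_test outlier normal breaks).1.insert (runOf y_test outlier normal breaks).2.1
          ((runOf y_test outlier normal breaks).2.2, (y_test.length : Int) - 1)
       else (runOf y_test outlier normal breaks).1).items := by
  show (geRun (geActions outlier normal (PySem.Set.ofList breaks)
          (PySem.List.enumerate ((normal :: y_test.dropLast).zip y_test) 0)
        ++ (if y_test ≠ [] ∧ y_test.getLast? = some outlier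
            then [(false, (y_test.length : Int) - 1)] else []))
        PySem.Dict.empty 0 0).items = _
  rw [pairs2_eq, geRun_eq, geRunS_append]
  by_cases h : y_test ≠ [] ∧ y_test.getLast? = some outlier
  · rw [if_pos h, if_pos h]
    simp [geRunS, runOf, actsOf]
  · rw [if_neg h, if_neg h]
    simp [geRunS, runOf, actsOf]

-- ===== VERDICT (by name: the statement is the Claim_ definition above) =====
theorem get_events_spec : Claim_unchanged_get_events := by
  intro y outlier normal breaks _ hpre hnd
  show get_events y outlier normal breaks = get_events_alt y outlier normal breaks
  rw [portA_shape, portB_shape]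
  cases hy : y with
  | nil =>
    subst hy
    have hno : ¬ (normal = outlier) := fun h => hpre ⟨rfl, h.symm⟩
    simp [List.getLastD, hno]
  | cons a r =>
    have hpos : 0 < y.length := by rw [hy]; simp
    have hd : y.getLastD normal ≠ outlier := fun h => hnd ⟨hpos, h⟩
    have hlast : ¬ (y ≠ [] ∧ y.getLast? = some outlier) := by
      rintro ⟨-, hq⟩
      apply hd
      rw [List.getLastD_eq_getLast?, hq]
      rfl
    rw [← hy, if_neg hd, if_neg hlast]

theorem get_events_changed : Claim_changed_get_events := by
  unfold Claim_changed_get_events; decide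

theorem get_events_tight : Claim_exact_get_events := by
  intro y outlier normal breaks _ _ hdd
  obtain ⟨hpos, hld⟩ := hdd
  have hne : y ≠ [] := by intro h; rw [h] at hpos; simp at hpos
  have hlast : y.getLast? = some outlier := by
    rw [List.getLastD_eq_getLast?] at hld
    cases hq : y.getLast? with
    | none => exact absurd (List.getLast?_eq_none_iff.mp hq) hne
    | some v => rw [hq] at hld; simpa using hld
  rw [portA_shape, portB_shape]
  rw [if_pos hld, if_pos ⟨hne, hlast⟩]
  apply insert_ne_of_val_ne
  intro h
  have h2 : ((y.length : Int) - 1) - 1 = (y.length : Int) - 1 := congrArg Prod.snd h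
  omega
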